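-- pv_equiv track=rewrite | github.com/akhandsingh17/assignments | codingexercise/ExpediaSDE1Problem3.py | ExpediaSDE1Problem3
-- ===== SOURCE A (Python) =====
-- def ExpediaSDE1Problem3(ary,lst):
--
--     dict={}
--
--     for key in lst:
--         flg=False
--
--         for i in range(0,len(ary)):
--             if ary[i]%key==0:
--                 if flg==False:
--                     idx=i
--                     flg=True
--             else:
--                 if flg==True:
--                     if key in dict.keys():
--                         dict[key].append(ary[idx:i])
--                     else:
--                         tmp=[]
--                         tmp.append(ary[idx:i])
--                         dict[key]=tmp
--                 flg=False
--         if flg==True: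
--             if key in dict.keys():
--                 dict[key].append(ary[idx:i+1])
--             else:
--                 tmp=[]
--                 tmp.append(ary[idx:i+1])
--                 dict[key]=tmp
--
--     tmp=[]
--     for key,val in dict.items():
--         for lst in val:
--             if len(tmp)==0:
--                 tmp=lst.copy()
--             else:
--                 if len(lst)>len(tmp):
--                     tmp=lst.copy()
--     return tmp
-- ===== SOURCE B (Python) =====
-- def ExpediaSDE1Problem3(ary, lst):
--     best_start = best_len = 0
--     for key in lst:
--         start = run = 0
--         for i, x in enumerate(ary):
--             if x % key == 0:
--                 if run == 0:
--                     start = i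
--                 run += 1
--                 if run > best_len:
--                     best_start, best_len = start, run
--             else:
--                 run = 0
--     return ary[best_start:best_start + best_len]
-- ===== Notes on version B (the rewrite author's own statement) =====
-- stated objective: simpler
-- what changed: B fuses A's build-a-dict-of-all-runs-per-key-then-scan-for-the-max into a single pass that tracks only the current run (start,len) and the global best (best_start,best_len), updating the best with strict >, and returns one final slice; no dict, no stored runs, no second selection loop.
import Mathlib
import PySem

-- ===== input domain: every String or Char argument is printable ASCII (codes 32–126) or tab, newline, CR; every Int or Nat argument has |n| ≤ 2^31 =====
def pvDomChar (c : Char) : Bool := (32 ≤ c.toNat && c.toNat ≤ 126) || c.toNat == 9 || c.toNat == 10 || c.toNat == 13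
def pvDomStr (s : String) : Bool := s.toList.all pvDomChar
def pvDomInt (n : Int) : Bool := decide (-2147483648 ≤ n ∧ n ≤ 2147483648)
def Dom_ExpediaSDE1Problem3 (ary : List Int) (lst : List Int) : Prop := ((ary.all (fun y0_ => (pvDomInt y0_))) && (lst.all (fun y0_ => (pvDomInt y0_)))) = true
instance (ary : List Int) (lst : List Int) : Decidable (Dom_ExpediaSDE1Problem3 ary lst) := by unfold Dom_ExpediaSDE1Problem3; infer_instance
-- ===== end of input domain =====

-- B replaces A's dict-of-all-runs-per-key plus final max-scan by one fused pass that keeps only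
-- the current run and the global best (start, length); objective: simpler (no stored runs, no dict).

-- ===== PORT A =====
-- 'if key in dict.keys(): dict[key].append(r) else: dict[key] = [r]'
def pvAppendRun (d : PySem.Dict Int (List (List Int))) (key : Int) (r : List Int) :
    PySem.Dict Int (List (List Int)) :=
  if d.contains key then d.modify key [] (fun v => v ++ [r]) else d.insert key [r]

-- the body of A's inner 'for i in range(0, len(ary))' loop; state = (flg, idx, dict)
def pvAStep (ary : List Int) (key : Int)
    (st : Bool × Int × PySem.Dict Int (List (List Int))) (i : Int) :
    Bool × Int × PySem.Dict Int (List (List Int)) :=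
  if PySem.Int.mod (PySem.List.pyGetD ary i 0) key = 0 then
    if st.1 = false then (true, i, st.2.2) else st
  else
    if st.1 = true then
      (false, st.2.1, pvAppendRun st.2.2 key (PySem.List.slice ary (some st.2.1) (some i)))
    else st

-- one pass of A's outer 'for key in lst' loop, including the trailing 'if flg==True' block
-- (there the leftover i equals len(ary)-1, so ary[idx:i+1] is ary[idx : (len(ary)-1)+1])
def pvAKey (ary : List Int) (d : PySem.Dict Int (List (List Int))) (key : Int) :
    PySem.Dict Int (List (List Int)) :=
  let st := (PySem.List.pyRange 0 (ary.length : Int) 1).foldl (pvAStep ary key) (false, 0, d)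
  if st.1 = true then
    pvAppendRun st.2.2 key (PySem.List.slice ary (some st.2.1) (some (((ary.length : Int) - 1) + 1)))
  else st.2.2

-- the body of A's final selection loops
def pvSelStep (tmp l : List Int) : List Int :=
  if tmp.length = 0 then l else if l.length > tmp.length then l else tmp

def ExpediaSDE1Problem3 (ary : List Int) (lst : List Int) : List Int :=
  let d := lst.foldl (pvAKey ary) PySem.Dict.empty
  d.items.foldl (fun tmp kv => kv.2.foldl pvSelStep tmp) []

-- ===== PORT B =====
-- body of B's inner 'for i, x in enumerate(ary)' loop; state = ((best_start, best_len), start, run)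
def pvBStep (key : Int) (q : (Int × Int) × Int × Int) (p : Int × Int) :
    (Int × Int) × Int × Int :=
  if PySem.Int.mod p.2 key = 0 then
    let start := if q.2.2 = 0 then p.1 else q.2.1
    let run := q.2.2 + 1
    if run > q.1.2 then ((start, run), start, run) else (q.1, start, run)
  else (q.1, q.2.1, 0)

-- one pass of B's outer 'for key in lst' loop
def pvBKey (ary : List Int) (b : Int × Int) (key : Int) : Int × Int :=
  ((PySem.List.enumerate ary 0).foldl (pvBStep key) (b, 0, 0)).1

def ExpediaSDE1Problem3_alt (ary : List Int) (lst : List Int) : List Int :=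
  let st := lst.foldl (pvBKey ary) (0, 0)
  PySem.List.slice ary (some st.1) (some (st.1 + st.2))

-- ===== PRECONDITION & SPEC =====
-- Pre_ excludes only the inputs where Python A raises ZeroDivisionError: a key 0 in lst
-- with a nonempty ary ('ary[i] % key' is evaluated); B raises there too.
def Pre_ExpediaSDE1Problem3 (ary : List Int) (lst : List Int) : Prop :=
  ary = [] ∨ (0 : Int) ∉ lst
instance (ary : List Int) (lst : List Int) : Decidable (Pre_ExpediaSDE1Problem3 ary lst) := by
  unfold Pre_ExpediaSDE1Problem3; infer_instance

def pvWitness_ExpediaSDE1Problem3 : List Int × List Int := ([6, 2, 4, 3], [2, 3])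

def Spec_ExpediaSDE1Problem3 (ary : List Int) (lst : List Int) (out : List Int) : Prop := out = ExpediaSDE1Problem3_alt ary lst
instance (ary : List Int) (lst : List Int) (out : List Int) : Decidable (Spec_ExpediaSDE1Problem3 ary lst out) := by unfold Spec_ExpediaSDE1Problem3; infer_instance

-- ===== CLAIM (what is proved, stated in full; the proofs are below) =====
def Claim_equal_ExpediaSDE1Problem3 : Prop := ∀ (ary : List Int) (lst : List Int), Dom_ExpediaSDE1Problem3 ary lst → Pre_ExpediaSDE1Problem3 ary lst → Spec_ExpediaSDE1Problem3 ary lst (ExpediaSDE1Problem3 ary lst)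

-- ===== LEMMAS AND PROOFS =====

-- maximal runs, as (start, length) pairs, of elements of the list divisible by key,
-- the list being indexed from i; cur is the currently open run
def pvRunsAux (key : Int) : List Int → Int → Option (Int × Int) → List (Int × Int)
  | [], _, none => []
  | [], _, some r => [r]
  | x :: xs, i, none =>
      if PySem.Int.mod x key = 0 then pvRunsAux key xs (i + 1) (some (i, 1))
      else pvRunsAux key xs (i + 1) none
  | x :: xs, i, some r =>
      if PySem.Int.mod x key = 0 then pvRunsAux key xs (i + 1) (some (r.1, r.2 + 1))
      else r :: pvRunsAux key xs (i + 1) none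

def pvRunsK (ary : List Int) (key : Int) : List (Int × Int) := pvRunsAux key ary 0 none

theorem pvRunsAux_cons_none (key x : Int) (xs : List Int) (i : Int) :
    pvRunsAux key (x :: xs) i none
      = if PySem.Int.mod x key = 0 then pvRunsAux key xs (i + 1) (some (i, 1))
        else pvRunsAux key xs (i + 1) none := rfl

theorem pvRunsAux_cons_some (key x : Int) (xs : List Int) (i : Int) (r : Int × Int) :
    pvRunsAux key (x :: xs) i (some r)
      = if PySem.Int.mod x key = 0 then pvRunsAux key xs (i + 1) (some (r.1, r.2 + 1))
        else r :: pvRunsAux key xs (i + 1) none := rfl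

def pvSlice (ary : List Int) (r : Int × Int) : List Int :=
  PySem.List.slice ary (some r.1) (some (r.1 + r.2))

def pvBestStep (b r : Int × Int) : Int × Int := if r.2 > b.2 then r else b

theorem pv_absorb (b : Int × Int) (s j m : Int) (h : j ≤ m) :
    pvBestStep (pvBestStep b (s, j)) (s, m) = pvBestStep b (s, m) := by
  simp only [pvBestStep]
  split_ifs with h1 h2 h3 h3 <;> simp_all <;> omega

theorem lemB (key : Int) (xs : List Int) :
    (∀ (i : Int) (b : Int × Int) (s : Int),
      ((PySem.List.enumerate xs i).foldl (pvBStep key) (b, s, 0)).1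
        = (pvRunsAux key xs i none).foldl pvBestStep b) ∧
    (∀ (i : Int) (b : Int × Int) (s r : Int), 1 ≤ r → i = s + r →
      ((PySem.List.enumerate xs i).foldl (pvBStep key) (pvBestStep b (s, r), s, r)).1
        = (pvRunsAux key xs i (some (s, r))).foldl pvBestStep b) := by
  induction xs with
  | nil =>
    constructor
    · intro i b s; simp [PySem.List.enumerate_nil, pvRunsAux]
    · intro i b s r _ _; simp [PySem.List.enumerate_nil, pvRunsAux]
  | cons x xs ih =>
    obtain ⟨ihn, iho⟩ := ih
    constructor
    · intro i b s
      rw [PySem.List.enumerate_cons, List.foldl_cons]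
      by_cases hm : PySem.Int.mod x key = 0
      · have hstep : pvBStep key (b, s, 0) (i, x) = (pvBestStep b (i, 1), i, 1) := by
          simp only [pvBStep, pvBestStep, hm, if_pos]; split_ifs <;> simp_all
        rw [hstep, iho (i + 1) b i 1 le_rfl (by ring)]
        simp [pvRunsAux, hm]
      · have hstep : pvBStep key (b, s, 0) (i, x) = (b, s, 0) := by
          simp [pvBStep, hm]
        rw [hstep, ihn (i + 1) b s]
        simp [pvRunsAux, hm]
    · intro i b s r hr hi
      rw [PySem.List.enumerate_cons, List.foldl_cons]
      by_cases hm : PySem.Int.mod x key = 0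
      · have hstep : pvBStep key (pvBestStep b (s, r), s, r) (i, x)
            = (pvBestStep (pvBestStep b (s, r)) (s, r + 1), s, r + 1) := by
          simp only [pvBStep, pvBestStep, hm, if_pos]
          have : ¬ (r = 0) := by omega
          split_ifs <;> simp_all
        rw [hstep, pv_absorb b s r (r + 1) (by omega),
          iho (i + 1) b s (r + 1) (by omega) (by omega)]
        simp [pvRunsAux, hm]
      · have hstep : pvBStep key (pvBestStep b (s, r), s, r) (i, x)
            = (pvBestStep b (s, r), s, 0) := by
          simp [pvBStep, hm]
        rw [hstep, ihn (i + 1) (pvBestStep b (s, r)) s]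
        simp [pvRunsAux, hm]

-- per-key characterisation of B's pass
theorem lemB_key (ary : List Int) (key : Int) (b : Int × Int) :
    pvBKey ary b key = (pvRunsK ary key).foldl pvBestStep b := by
  exact (lemB key ary).1 0 b 0

def pvDAppAll (d : PySem.Dict Int (List (List Int))) (key : Int) (rs : List (List Int)) :
    PySem.Dict Int (List (List Int)) :=
  rs.foldl (fun d r => pvAppendRun d key r) d

def pvAPost (ary : List Int) (key : Int) (st : Bool × Int × PySem.Dict Int (List (List Int))) :
    PySem.Dict Int (List (List Int)) :=
  if st.1 = true then
    pvAppendRun st.2.2 key (PySem.List.slice ary (some st.2.1) (some (((ary.length : Int) - 1) + 1)))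
  else st.2.2

theorem lemA (ary : List Int) (key : Int) (xs : List Int) :
    (∀ (i : Nat), xs = ary.drop i → i ≤ ary.length →
      ∀ (d : PySem.Dict Int (List (List Int))) (idx0 : Int),
        pvAPost ary key ((PySem.List.pyRange i (ary.length : Int) 1).foldl (pvAStep ary key) (false, idx0, d))
          = pvDAppAll d key ((pvRunsAux key xs i none).map (pvSlice ary))) ∧
    (∀ (i : Nat), xs = ary.drop i → i ≤ ary.length →
      ∀ (d : PySem.Dict Int (List (List Int))) (s r : Int), 1 ≤ r → (i : Int) = s + r →
        pvAPost ary key ((PySem.List.pyRange i (ary.length : Int) 1).foldl (pvAStep ary key) (true, s, d))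
          = pvDAppAll d key ((pvRunsAux key xs i (some (s, r))).map (pvSlice ary))) := by
  induction xs with
  | nil =>
    constructor
    · intro i hdrop hle d idx0
      have hi : i = ary.length := by
        have := List.drop_eq_nil_iff.mp hdrop.symm; omega
      subst hi
      rw [PySem.List.pyRange_one_eq_nil (le_refl _)]
      simp [pvAPost, pvRunsAux, pvDAppAll]
    · intro i hdrop hle d s r hr hi
      have hlen : i = ary.length := by
        have := List.drop_eq_nil_iff.mp hdrop.symm; omega
      subst hlen
      rw [PySem.List.pyRange_one_eq_nil (le_refl _)]
      simp only [List.foldl_nil, pvAPost, if_pos rfl]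
      have harg : (((ary.length : Int)) - 1) + 1 = s + r := by omega
      simp [pvRunsAux, pvDAppAll, pvSlice, harg]
  | cons x xs ihx =>
    obtain ⟨ihn, iho⟩ := ihx
    have common : ∀ (i : Nat), x :: xs = ary.drop i → i < ary.length ∧ xs = ary.drop (i + 1) ∧
        PySem.List.pyGetD ary (i : Int) 0 = x := by
      intro i hdrop
      have hlt : i < ary.length := by
        have hl := congrArg List.length hdrop
        simp [List.length_drop] at hl; omega
      have htail : xs = ary.drop (i + 1) := by
        have h := (List.tail_drop (l := ary) (i := i)).symm
        rw [← hdrop] at h; simpa using h.symm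
      have hget : ary[i]? = some x := by
        have h0 : (ary.drop i)[0]? = some x := by rw [← hdrop]; rfl
        rw [List.getElem?_drop] at h0; simpa using h0
      refine ⟨hlt, htail, ?_⟩
      rw [PySem.List.pyGetD_natCast]
      simp [List.getD_eq_getElem?_getD, hget]
    constructor
    · intro i hdrop hle d idx0
      obtain ⟨hlt, htail, hx⟩ := common i hdrop
      rw [PySem.List.pyRange_one_cons (by exact_mod_cast hlt), List.foldl_cons]
      have hcast : ((i : Int) + 1) = ((i + 1 : Nat) : Int) := by push_cast; ring
      by_cases hm : PySem.Int.mod x key = 0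
      · have hstep : pvAStep ary key (false, idx0, d) (i : Int) = (true, (i : Int), d) := by
          simp [pvAStep, hx, hm]
        rw [hstep, hcast, iho (i + 1) htail (by omega) d (i : Int) 1 le_rfl (by push_cast; ring)]
        rw [pvRunsAux_cons_none]
        simp [hm]
      · have hstep : pvAStep ary key (false, idx0, d) (i : Int) = (false, idx0, d) := by
          simp [pvAStep, hx, hm]
        rw [hstep, hcast, ihn (i + 1) htail (by omega) d idx0]
        rw [pvRunsAux_cons_none]
        simp [hm]
    · intro i hdrop hle d s r hr hi
      obtain ⟨hlt, htail, hx⟩ := common i hdrop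
      rw [PySem.List.pyRange_one_cons (by exact_mod_cast hlt), List.foldl_cons]
      have hcast : ((i : Int) + 1) = ((i + 1 : Nat) : Int) := by push_cast; ring
      by_cases hm : PySem.Int.mod x key = 0
      · have hstep : pvAStep ary key (true, s, d) (i : Int) = (true, s, d) := by
          simp [pvAStep, hx, hm]
        rw [hstep, hcast, iho (i + 1) htail (by omega) d s (r + 1) (by omega) (by push_cast at hi ⊢; omega)]
        rw [pvRunsAux_cons_some]
        simp [hm]
      · have hstep : pvAStep ary key (true, s, d) (i : Int)
            = (false, s, pvAppendRun d key (PySem.List.slice ary (some s) (some (i : Int)))) := by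
          simp [pvAStep, hx, hm]
        have hslice : PySem.List.slice ary (some s) (some (i : Int)) = pvSlice ary (s, r) := by
          simp [pvSlice, hi]
        rw [hstep, hslice, hcast, ihn (i + 1) htail (by omega) _ s]
        rw [pvRunsAux_cons_some]
        simp [hm, pvDAppAll]

theorem lemA_key (ary : List Int) (key : Int) (d : PySem.Dict Int (List (List Int))) :
    pvAKey ary d key = pvDAppAll d key ((pvRunsK ary key).map (pvSlice ary)) := by
  have h := (lemA ary key ary).1 0 (by simp) (by simp) d 0
  simpa [pvAKey, pvAPost, pvRunsK] using h


theorem pvRuns_bounds (key : Int) (xs : List Int) :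
    (∀ (i : Int), 0 ≤ i → ∀ p ∈ pvRunsAux key xs i none,
        0 ≤ p.1 ∧ 1 ≤ p.2 ∧ p.1 + p.2 ≤ i + xs.length) ∧
    (∀ (i s r : Int), 0 ≤ s → 1 ≤ r → i = s + r → ∀ p ∈ pvRunsAux key xs i (some (s, r)),
        0 ≤ p.1 ∧ 1 ≤ p.2 ∧ p.1 + p.2 ≤ i + xs.length) := by
  induction xs with
  | nil =>
    constructor
    · intro i _ p hp; simp [pvRunsAux] at hp
    · intro i s r hs hr hi p hp; simp [pvRunsAux] at hp; subst hp; simp; omega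
  | cons x xs ih =>
    obtain ⟨ihn, iho⟩ := ih
    constructor
    · intro i hi p hp
      simp only [pvRunsAux] at hp
      split_ifs at hp with hm
      · have := iho (i + 1) i 1 hi (by omega) (by omega) p hp
        simp at this ⊢; omega
      · have := ihn (i + 1) (by omega) p hp
        simp at this ⊢; omega
    · intro i s r hs hr hi p hp
      simp only [pvRunsAux] at hp
      split_ifs at hp with hm
      · have := iho (i + 1) s (r + 1) hs (by omega) (by omega) p hp
        simp at this ⊢; omega
      · rcases List.mem_cons.mp hp with h | h
        · subst h; simp; omega
        · have := ihn (i + 1) (by omega) p h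
          simp at this ⊢; omega

-- a 'good' pair: (0,0) or an in-bounds run (start, positive length)
def pvGood (ary : List Int) (b : Int × Int) : Prop :=
  b = (0, 0) ∨ (0 ≤ b.1 ∧ 1 ≤ b.2 ∧ b.1 + b.2 ≤ (ary.length : Int))

theorem pvGood_runsK (ary : List Int) (key : Int) (p : Int × Int)
    (hp : p ∈ pvRunsK ary key) : 0 ≤ p.1 ∧ 1 ≤ p.2 ∧ p.1 + p.2 ≤ (ary.length : Int) := by
  have := (pvRuns_bounds key ary).1 0 le_rfl p hp
  omega

theorem pvSlice_length (ary : List Int) (b : Int × Int) (hb : pvGood ary b) :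
    ((pvSlice ary b).length : Int) = b.2 := by
  rcases hb with h | ⟨h1, h2, h3⟩
  · subst h
    simp only [pvSlice]
    rw [PySem.List.slice_toNat ary (by omega) (by omega)]
    simp
  · simp only [pvSlice]
    rw [PySem.List.slice_toNat ary (by omega) (by omega)]
    simp [List.length_take, List.length_drop]
    omega

theorem pvSlice_zero (ary : List Int) : pvSlice ary (0, 0) = [] := by
  simp only [pvSlice]
  rw [PySem.List.slice_toNat ary (by omega) (by omega)]
  simp

theorem pv_sel_vs_best (ary : List Int) (R : List (Int × Int)) (b : Int × Int)
    (hR : ∀ p ∈ R, 0 ≤ p.1 ∧ 1 ≤ p.2 ∧ p.1 + p.2 ≤ (ary.length : Int))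
    (hb : pvGood ary b) :
    (R.map (pvSlice ary)).foldl pvSelStep (pvSlice ary b)
      = pvSlice ary (R.foldl pvBestStep b) := by
  induction R generalizing b with
  | nil => simp
  | cons p R ih =>
    have hgp := hR p (by simp)
    have hlb := pvSlice_length ary b hb
    have hlp : ((pvSlice ary p).length : Int) = p.2 := pvSlice_length ary p (Or.inr hgp)
    have hstep : pvSelStep (pvSlice ary b) (pvSlice ary p) = pvSlice ary (pvBestStep b p) := by
      simp only [pvSelStep, pvBestStep]
      split_ifs <;> first | rfl | (exfalso; omega)
    rw [List.map_cons, List.foldl_cons, List.foldl_cons, hstep]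
    refine ih (pvBestStep b p) (fun q hq => hR q (List.mem_cons_of_mem _ hq)) ?_
    simp only [pvBestStep]
    split_ifs
    · exact Or.inr hgp
    · exact hb

-- ===== monotonicity / absorption of pvBestStep folds =====
theorem pvBest_mono (L : List (Int × Int)) (b : Int × Int) :
    b.2 ≤ (L.foldl pvBestStep b).2 ∧ ∀ p ∈ L, p.2 ≤ (L.foldl pvBestStep b).2 := by
  induction L generalizing b with
  | nil => simp
  | cons q L ih =>
    have h1 := (ih (pvBestStep b q)).1
    have h2 := (ih (pvBestStep b q)).2
    have hq : b.2 ≤ (pvBestStep b q).2 ∧ q.2 ≤ (pvBestStep b q).2 := by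
      simp [pvBestStep]; split_ifs <;> omega
    refine ⟨by simp only [List.foldl_cons]; omega, ?_⟩
    intro p hp
    rcases List.mem_cons.mp hp with h | h
    · subst h; simp only [List.foldl_cons]; omega
    · simpa using h2 p h

theorem pvBest_noop (L : List (Int × Int)) (b : Int × Int)
    (h : ∀ p ∈ L, p.2 ≤ b.2) : L.foldl pvBestStep b = b := by
  induction L with
  | nil => rfl
  | cons q L ih =>
    have hq : pvBestStep b q = b := by
      have := h q (by simp); simp [pvBestStep]; omega
    simp only [List.foldl_cons, hq]
    exact ih (fun p hp => h p (List.mem_cons_of_mem _ hp))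

theorem pvBest_replicate (R : List (Int × Int)) (b : Int × Int) (c : Nat) (hc : 1 ≤ c) :
    ((List.replicate c R).flatten).foldl pvBestStep b = R.foldl pvBestStep b := by
  induction c generalizing b with
  | zero => omega
  | succ c ih =>
    rw [List.replicate_succ, List.flatten_cons, List.foldl_append]
    rcases Nat.eq_zero_or_pos c with h0 | hpos
    · subst h0; simp
    · rw [ih (List.foldl pvBestStep b R) hpos]
      apply pvBest_noop
      intro p hp
      exact (pvBest_mono R b).2 p hp

-- ===== the list-level content of A's dict updates =====
def pvUpd (L : List (Int × List (List Int))) (k : Int) (r : List Int) :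
    List (Int × List (List Int)) :=
  match L with
  | [] => [(k, [r])]
  | (k', v) :: t => if k' = k then (k', v ++ [r]) :: t else (k', v) :: pvUpd t k r

theorem pvAppendRun_items (d : PySem.Dict Int (List (List Int))) (k : Int) (r : List Int) :
    (pvAppendRun d k r).items
      = if d.contains k then
          d.items.map (fun p => if p.1 == k then (k, d.getD k [] ++ [r]) else p)
        else d.items ++ [(k, [r])] := by
  simp only [pvAppendRun, PySem.Dict.modify]
  split_ifs with h
  · rw [PySem.Dict.items_insert_of_contains _ _ h]
  · rw [PySem.Dict.items_insert_of_not_contains _ _ (by simpa using h)]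

theorem pvAppendRun_mk (L : List (Int × List (List Int))) (k : Int) (r : List Int)
    (hnd : (L.map Prod.fst).Nodup) :
    pvAppendRun (PySem.Dict.mk L) k r = PySem.Dict.mk (pvUpd L k r) := by
  induction L with
  | nil =>
    apply PySem.Dict.ext
    rw [pvAppendRun_items]
    simp [pvUpd, PySem.Dict.contains]
  | cons hd t ih =>
    obtain ⟨k', v⟩ := hd
    have hnd2 : k' ∉ t.map Prod.fst ∧ (t.map Prod.fst).Nodup := by
      rw [List.map_cons] at hnd; exact List.nodup_cons.mp hnd
    have hnd' : (t.map Prod.fst).Nodup := hnd2.2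
    by_cases hk : k' = k
    · subst hk
      apply PySem.Dict.ext
      rw [pvAppendRun_items]
      have hc : (PySem.Dict.mk ((k', v) :: t)).contains k' = true := by
        simp [PySem.Dict.contains]
      rw [if_pos hc]
      have hget : (PySem.Dict.mk ((k', v) :: t)).getD k' [] = v := by
        rw [PySem.Dict.getD_eq_get?_getD, PySem.Dict.get?_mk_cons]; simp
      rw [hget]
      have hmapt : t.map (fun p => if p.1 = k' then (k', v ++ [r]) else p) = t := by
        have : ∀ p ∈ t, (fun p => if p.1 = k' then (k', v ++ [r]) else p) p = id p := by
          intro p hp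
          have hne : p.1 ≠ k' := by
            intro h
            exact hnd2.1 (h ▸ List.mem_map_of_mem hp)
          simp [hne]
        rw [List.map_congr_left this, List.map_id]
      simp [pvUpd, hmapt]
    · apply PySem.Dict.ext
      rw [pvAppendRun_items]
      have hcc : (PySem.Dict.mk ((k', v) :: t)).contains k
          = (PySem.Dict.mk t).contains k := by
        simp [PySem.Dict.contains, hk]
      have hgg : (PySem.Dict.mk ((k', v) :: t)).getD k []
          = (PySem.Dict.mk t).getD k [] := by
        rw [PySem.Dict.getD_eq_get?_getD, PySem.Dict.get?_mk_cons,
          PySem.Dict.getD_eq_get?_getD]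
        simp [hk]
      have hitems := congrArg PySem.Dict.items (ih hnd')
      rw [pvAppendRun_items] at hitems
      by_cases hc2 : (PySem.Dict.mk t).contains k
      · rw [hcc, if_pos hc2, hgg]
        rw [if_pos hc2] at hitems
        simp only [PySem.Dict.items, beq_iff_eq] at hitems
        simp only [pvUpd, List.map_cons, beq_iff_eq]
        rw [if_neg hk, if_neg hk]
        exact congrArg _ hitems
      · rw [hcc, if_neg hc2]
        rw [if_neg hc2] at hitems
        simp only [PySem.Dict.items] at hitems
        simp only [pvUpd]
        rw [if_neg hk, List.cons_append]
        exact congrArg _ hitems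

theorem pvUpd_keys (L : List (Int × List (List Int))) (k : Int) (r : List Int) :
    (pvUpd L k r).map Prod.fst
      = if k ∈ L.map Prod.fst then L.map Prod.fst else L.map Prod.fst ++ [k] := by
  induction L with
  | nil => simp [pvUpd]
  | cons hd t ih =>
    obtain ⟨k', v⟩ := hd
    by_cases hk : k' = k
    · subst hk; simp [pvUpd]
    · simp only [pvUpd, if_neg hk, List.map_cons, ih]
      by_cases hm : k ∈ t.map Prod.fst
      · simp [hm, hk, Ne.symm hk]
      · simp [hm, hk, Ne.symm hk]

theorem pvDAppAll_mk (L : List (Int × List (List Int))) (k : Int)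
    (rs : List (List Int)) (hnd : (L.map Prod.fst).Nodup) :
    pvDAppAll (PySem.Dict.mk L) k rs
      = PySem.Dict.mk (rs.foldl (fun L r => pvUpd L k r) L) := by
  induction rs generalizing L with
  | nil => simp [pvDAppAll]
  | cons r rs ih =>
    have hnd' : ((pvUpd L k r).map Prod.fst).Nodup := by
      rw [pvUpd_keys]
      split_ifs with hm
      · exact hnd
      · rw [List.nodup_append]
        refine ⟨hnd, by simp, ?_⟩
        intro a ha b hb
        simp only [List.mem_singleton] at hb
        subst hb
        exact fun he => hm (he ▸ ha)
    have h1 : pvDAppAll (PySem.Dict.mk L) k (r :: rs)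
        = pvDAppAll (PySem.Dict.mk (pvUpd L k r)) k rs := by
      simp [pvDAppAll, pvAppendRun_mk L k r hnd]
    rw [h1, ih _ hnd']
    rfl

theorem pvUpd_notmem (L : List (Int × List (List Int))) (k : Int) (r : List Int)
    (h : k ∉ L.map Prod.fst) : pvUpd L k r = L ++ [(k, [r])] := by
  induction L with
  | nil => simp [pvUpd]
  | cons hd t ih =>
    obtain ⟨k', v⟩ := hd
    simp only [List.map_cons, List.mem_cons] at h
    push_neg at h
    simp only [pvUpd, if_neg (Ne.symm h.1)]
    rw [ih h.2]
    rfl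

theorem pvUpd_split (X Y : List (Int × List (List Int))) (k : Int) (v : List (List Int))
    (r : List Int) (h : k ∉ X.map Prod.fst) :
    pvUpd (X ++ (k, v) :: Y) k r = X ++ (k, v ++ [r]) :: Y := by
  induction X with
  | nil => simp [pvUpd]
  | cons hd t ih =>
    obtain ⟨k', w⟩ := hd
    simp only [List.map_cons, List.mem_cons] at h
    push_neg at h
    simp only [List.cons_append, pvUpd, if_neg (Ne.symm h.1)]
    rw [ih h.2]

theorem pvUpdAll_split (X Y : List (Int × List (List Int))) (k : Int) (v : List (List Int))
    (rs : List (List Int)) (h : k ∉ X.map Prod.fst) :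
    rs.foldl (fun L r => pvUpd L k r) (X ++ (k, v) :: Y) = X ++ (k, v ++ rs) :: Y := by
  induction rs generalizing v with
  | nil => simp
  | cons r rs ih =>
    rw [List.foldl_cons, pvUpd_split X Y k v r h, ih (v ++ [r])]
    simp

theorem pvUpdAll_notmem (L : List (Int × List (List Int))) (k : Int) (rs : List (List Int))
    (h : k ∉ L.map Prod.fst) (hrs : rs ≠ []) :
    rs.foldl (fun L r => pvUpd L k r) L = L ++ [(k, rs)] := by
  cases rs with
  | nil => exact absurd rfl hrs
  | cons r rs =>
    rw [List.foldl_cons, pvUpd_notmem L k r h]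
    have := pvUpdAll_split L [] k [r] rs h
    simpa using this

-- ===== dedup recursion =====
theorem pv_dedup_append_singleton {α : Type} [BEq α] [LawfulBEq α] (l : List α) (x : α) :
    PySem.List.dedup (l ++ [x])
      = if x ∈ l then PySem.List.dedup l else PySem.List.dedup l ++ [x] := by
  rw [PySem.List.dedup_eq_ofList, PySem.List.dedup_eq_ofList]
  show (PySem.Set.ofList (l ++ [x])) = _
  rw [PySem.Set.ofList, List.foldl_append]
  simp only [List.foldl_cons, List.foldl_nil]
  rw [show List.foldl PySem.Set.add PySem.Set.empty l = PySem.Set.ofList l from rfl]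
  by_cases hm : x ∈ l
  · rw [if_pos hm]
    simp only [PySem.Set.add]
    rw [if_pos ?_]
    have : x ∈ PySem.Set.ofList l := (PySem.Set.mem_ofList l x).mpr hm
    simpa [List.contains_iff_mem] using this
  · rw [if_neg hm]
    simp only [PySem.Set.add]
    rw [if_neg ?_]
    have : x ∉ PySem.Set.ofList l := fun hc => hm ((PySem.Set.mem_ofList l x).mp hc)
    simpa [List.contains_iff_mem] using this

-- ===== the dict invariant =====
def pvG (ary : List Int) (k : Int) : Bool := decide (pvRunsK ary k ≠ [])
def pvOcc (ary : List Int) (l : List Int) : List Int := PySem.List.dedup (l.filter (pvG ary))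
def pvVal (ary : List Int) (l : List Int) (k : Int) : List (List Int) :=
  (List.replicate (l.count k) ((pvRunsK ary k).map (pvSlice ary))).flatten
def pvItems (ary : List Int) (l : List Int) : List (Int × List (List Int)) :=
  (pvOcc ary l).map (fun k => (k, pvVal ary l k))

theorem pvOcc_mem {ary : List Int} {l : List Int} {k : Int} (h : k ∈ pvOcc ary l) :
    k ∈ l ∧ pvG ary k = true := by
  have h1 : k ∈ l.filter (pvG ary) := by
    rw [pvOcc, PySem.List.dedup_eq_ofList] at h
    exact (PySem.Set.mem_ofList _ _).mp h
  exact ⟨List.mem_of_mem_filter h1, List.of_mem_filter h1⟩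

theorem pvOcc_nodup (ary : List Int) (l : List Int) : (pvOcc ary l).Nodup := by
  rw [pvOcc, PySem.List.dedup_eq_ofList]
  exact PySem.Set.nodup_ofList _

theorem pvOcc_append_singleton (ary : List Int) (l : List Int) (k : Int) :
    pvOcc ary (l ++ [k])
      = if pvG ary k = true then (if k ∈ l then pvOcc ary l else pvOcc ary l ++ [k])
        else pvOcc ary l := by
  rw [pvOcc, List.filter_append]
  by_cases hg : pvG ary k = true
  · simp only [hg, List.filter_cons, List.filter_nil, if_pos, if_true]
    rw [pv_dedup_append_singleton]
    by_cases hm : k ∈ l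
    · rw [if_pos (List.mem_filter.mpr ⟨hm, hg⟩), if_pos hm]; rfl
    · rw [if_neg (fun hc => hm (List.mem_of_mem_filter hc)), if_neg hm]; rfl
  · simp [hg, pvOcc]

theorem pvVal_append_ne (ary : List Int) (l : List Int) (k k' : Int) (h : k' ≠ k) :
    pvVal ary (l ++ [k]) k' = pvVal ary l k' := by
  simp only [pvVal, List.count_append]
  have hc : List.count k' [k] = 0 := by
    rw [List.count_eq_zero]
    simp [h]
  rw [hc, Nat.add_zero]

theorem pvVal_append_self (ary : List Int) (l : List Int) (k : Int) :
    pvVal ary (l ++ [k]) k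
      = pvVal ary l k ++ (pvRunsK ary k).map (pvSlice ary) := by
  simp only [pvVal, List.count_append]
  have hc : List.count k [k] = 1 := by simp
  rw [hc, List.replicate_succ']
  simp

theorem pv_dict_inv (ary : List Int) (lst : List Int) :
    lst.foldl (pvAKey ary) PySem.Dict.empty = PySem.Dict.mk (pvItems ary lst) := by
  induction lst using List.reverseRecOn with
  | nil =>
    show PySem.Dict.empty = _
    apply PySem.Dict.ext
    simp [pvItems, pvOcc, PySem.List.dedup_eq_ofList, PySem.Set.ofList, PySem.Dict.empty]
  | append_singleton l k ih =>
    rw [List.foldl_append, List.foldl_cons, List.foldl_nil, ih, lemA_key]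
    have hkeys : (pvItems ary l).map Prod.fst = pvOcc ary l := by
      simp [pvItems, List.map_map, Function.comp_def]
    have hnd : ((pvItems ary l).map Prod.fst).Nodup := by
      rw [hkeys]; exact pvOcc_nodup ary l
    rw [pvDAppAll_mk _ _ _ hnd]
    apply PySem.Dict.ext
    show ((pvRunsK ary k).map (pvSlice ary)).foldl (fun L r => pvUpd L k r) (pvItems ary l)
        = pvItems ary (l ++ [k])
    by_cases hg : pvG ary k = true
    · by_cases hm : k ∈ l
      · -- k already has an entry: append RsS k to it
        have hko : k ∈ pvOcc ary l := by
          rw [pvOcc, PySem.List.dedup_eq_ofList]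
          exact (PySem.Set.mem_ofList _ _).mpr (List.mem_filter.mpr ⟨hm, hg⟩)
        obtain ⟨X0, Y0, hsplit⟩ := List.mem_iff_append.mp hko
        have hndo := pvOcc_nodup ary l
        rw [hsplit] at hndo
        have hnd3 := List.nodup_append.mp hndo
        have hkX0 : k ∉ X0 := by
          intro hc
          exact hnd3.2.2 k hc k List.mem_cons_self rfl
        have hItems : pvItems ary l
            = X0.map (fun k' => (k', pvVal ary l k'))
              ++ (k, pvVal ary l k) :: Y0.map (fun k' => (k', pvVal ary l k')) := by
          rw [pvItems, hsplit]; simp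
        rw [hItems, pvUpdAll_split _ _ _ _ _ (by
          intro hc
          rcases List.mem_map.mp hc with ⟨p, hp, hfst⟩
          rcases List.mem_map.mp hp with ⟨k', hk', rfl⟩
          exact hkX0 (by simpa [← hfst] using hk'))]
        rw [pvItems, pvOcc_append_singleton, if_pos hg, if_pos hm, hsplit]
        simp only [List.map_append, List.map_cons]
        congr 1
        · apply List.map_congr_left
          intro k' hk'
          have hne : k' ≠ k := by
            intro he
            exact hkX0 (he ▸ hk')
          rw [pvVal_append_ne ary l k k' hne]
        · congr 1
          · rw [pvVal_append_self]
          · apply List.map_congr_left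
            intro k' hk'
            have hne : k' ≠ k := by
              intro he
              subst he
              exact (List.nodup_cons.mp hnd3.2.1).1 hk'
            rw [pvVal_append_ne ary l k k' hne]
      · -- fresh key: appended at the end
        have hko : k ∉ pvOcc ary l := fun hc => hm (pvOcc_mem hc).1
        have hrs : (pvRunsK ary k).map (pvSlice ary) ≠ [] := by
          simp only [pvG, decide_eq_true_eq] at hg
          simpa using hg
        rw [pvUpdAll_notmem _ _ _ (by rw [hkeys]; exact hko) hrs]
        conv_rhs => rw [pvItems]
        rw [pvOcc_append_singleton, if_pos hg, if_neg hm]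
        simp only [List.map_append, List.map_cons, List.map_nil]
        congr 1
        · rw [pvItems]
          apply List.map_congr_left
          intro k' hk'
          have hne : k' ≠ k := fun he => hm (he ▸ (pvOcc_mem hk').1)
          rw [pvVal_append_ne ary l k k' hne]
        · have hc0 : l.count k = 0 := List.count_eq_zero.mpr hm
          simp [pvVal, List.count_append, hc0]
    · -- no runs for k: nothing appended, nothing in the dict changes
      have hrs : pvRunsK ary k = [] := by
        simp only [pvG, decide_eq_true_eq] at hg
        push_neg at hg
        exact hg
      rw [hrs]
      simp only [List.map_nil, List.foldl_nil]
      conv_rhs => rw [pvItems]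
      rw [pvOcc_append_singleton, if_neg hg]
      rw [pvItems]
      apply List.map_congr_left
      intro k' hk'
      have hne : k' ≠ k := by
        intro he
        subst he
        exact hg (pvOcc_mem hk').2
      rw [pvVal_append_ne ary l k k' hne]

-- ===== pairs-level reductions =====
theorem pvFK_filter (ary : List Int) (l : List Int) (b : Int × Int) :
    l.foldl (fun b k => (pvRunsK ary k).foldl pvBestStep b) b
      = (l.filter (pvG ary)).foldl (fun b k => (pvRunsK ary k).foldl pvBestStep b) b := by
  induction l generalizing b with
  | nil => rfl
  | cons k l ih =>
    rw [List.foldl_cons, List.filter_cons]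
    by_cases hg : pvG ary k = true
    · rw [if_pos (by simpa using hg), List.foldl_cons]
      exact ih _
    · have hrs : pvRunsK ary k = [] := by
        simp only [pvG, decide_eq_true_eq] at hg
        push_neg at hg
        exact hg
      rw [if_neg (by simpa using hg), hrs]
      simpa using ih b

theorem pvFK_dedup (ary : List Int) (l : List Int) (b : Int × Int) :
    l.foldl (fun b k => (pvRunsK ary k).foldl pvBestStep b) b
      = (PySem.List.dedup l).foldl (fun b k => (pvRunsK ary k).foldl pvBestStep b) b := by
  induction l using List.reverseRecOn with
  | nil => rfl
  | append_singleton l k ih =>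
    rw [List.foldl_append, List.foldl_cons, List.foldl_nil, pv_dedup_append_singleton]
    by_cases hm : k ∈ l
    · rw [if_pos hm, ← ih]
      apply pvBest_noop
      intro p hp
      have hflat : l.foldl (fun b k => (pvRunsK ary k).foldl pvBestStep b) b
          = ((l.map (pvRunsK ary)).flatten).foldl pvBestStep b := by
        rw [List.foldl_flatten, List.foldl_map]
      rw [hflat]
      exact (pvBest_mono _ b).2 p
        (List.mem_flatten.mpr ⟨pvRunsK ary k, List.mem_map_of_mem hm, hp⟩)
    · rw [if_neg hm, List.foldl_append, List.foldl_cons, List.foldl_nil, ih]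

theorem pv_filter_dedup (ary : List Int) (l : List Int) :
    (PySem.List.dedup l).filter (pvG ary) = PySem.List.dedup (l.filter (pvG ary)) := by
  induction l using List.reverseRecOn with
  | nil => rfl
  | append_singleton l x ih =>
    rw [pv_dedup_append_singleton, List.filter_append]
    by_cases hg : pvG ary x = true
    · simp only [List.filter_cons, List.filter_nil, hg, if_true]
      by_cases hm : x ∈ l
      · rw [if_pos hm, pv_dedup_append_singleton,
          if_pos (List.mem_filter.mpr ⟨hm, hg⟩), ih]
      · rw [if_neg hm, List.filter_append, pv_dedup_append_singleton,
          if_neg (fun hc => hm (List.mem_of_mem_filter hc)), ih]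
        simp [hg]
    · simp only [List.filter_cons, List.filter_nil, hg, if_false]
      by_cases hm : x ∈ l
      · rw [if_pos hm, ih]; simp
      · rw [if_neg hm, List.filter_append, ih]
        simp [hg]

-- ===== VERDICT (by name: the statement is the Claim_ definition above) =====
theorem pv_final (ary : List Int) (lst : List Int) :
    ExpediaSDE1Problem3 ary lst = ExpediaSDE1Problem3_alt ary lst := by
  have hA : ExpediaSDE1Problem3 ary lst
      = (pvItems ary lst).foldl (fun tmp kv => kv.2.foldl pvSelStep tmp) [] := by
    show (lst.foldl (pvAKey ary) PySem.Dict.empty).items.foldl _ [] = _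
    rw [pv_dict_inv]
  -- the flattened run list, as (start, length) pairs
  set P : List (Int × Int) :=
    ((pvOcc ary lst).map
      (fun k => (List.replicate (lst.count k) (pvRunsK ary k)).flatten)).flatten with hP
  have hsel : ExpediaSDE1Problem3 ary lst
      = (P.map (pvSlice ary)).foldl pvSelStep (pvSlice ary (0, 0)) := by
    rw [hA, pvSlice_zero]
    have hflat : (pvItems ary lst).foldl (fun tmp kv => kv.2.foldl pvSelStep tmp) []
        = (((pvItems ary lst).map Prod.snd).flatten).foldl pvSelStep [] := by
      rw [List.foldl_flatten, List.foldl_map]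
    rw [hflat]
    congr 1
    rw [hP, pvItems]
    rw [List.map_flatten]
    simp only [List.map_map]
    congr 1
    apply List.map_congr_left
    intro k _
    simp [Function.comp_def, pvVal, List.map_flatten, List.map_replicate]
  have hPgood : ∀ p ∈ P, 0 ≤ p.1 ∧ 1 ≤ p.2 ∧ p.1 + p.2 ≤ (ary.length : Int) := by
    intro p hp
    rw [hP] at hp
    rcases List.mem_flatten.mp hp with ⟨L, hL, hpL⟩
    rcases List.mem_map.mp hL with ⟨k, _, rfl⟩
    rcases List.mem_flatten.mp hpL with ⟨R, hR, hpR⟩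
    rcases List.mem_replicate.mp hR with ⟨_, rfl⟩
    exact pvGood_runsK ary k p hpR
  rw [hsel, pv_sel_vs_best ary P (0, 0) hPgood (Or.inl rfl)]
  -- reduce the grouped fold over P to B's fold over lst
  have hgroup : P.foldl pvBestStep (0, 0)
      = (pvOcc ary lst).foldl (fun b k => (pvRunsK ary k).foldl pvBestStep b) (0, 0) := by
    rw [hP, List.foldl_flatten, List.foldl_map]
    apply PySem.List.foldl_congr_mem
    intro b k hk
    rw [List.foldl_flatten]
    have hc : 1 ≤ lst.count k := List.count_pos_iff.mpr (pvOcc_mem hk).1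
    have := pvBest_replicate (pvRunsK ary k) b (lst.count k) hc
    rw [List.foldl_flatten] at this
    exact this
  have hpairs : P.foldl pvBestStep (0, 0) = lst.foldl (pvBKey ary) (0, 0) := by
    rw [hgroup]
    rw [show pvOcc ary lst = (PySem.List.dedup lst).filter (pvG ary) from
      (pv_filter_dedup ary lst).symm]
    rw [← pvFK_filter, ← pvFK_dedup]
    symm
    apply PySem.List.foldl_congr_mem
    intro b k _
    exact lemB_key ary k b
  rw [hpairs]
  rfl

-- ===== VERDICT (by name: the statement is the Claim_ definition above) =====
theorem ExpediaSDE1Problem3_spec : Claim_equal_ExpediaSDE1Problem3 := by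
  intro ary lst _ _
  unfold Spec_ExpediaSDE1Problem3
  exact pv_final ary lst
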